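-- pv_equiv track=rewrite | github.com/miliar/Code_Jam_Webscraper | solutions_python/Problem_55/393.py | solve
-- ===== SOURCE A (Python) =====
-- import copy
--
-- def solve(r, k, n, g):
--     cycles = {}
--     front = 0
--     r1 = 0
--     result = 0
--     riding = []
--     queue = copy.copy(g)
--     while r1 < r:
--         r1 += 1
--         try:
--             front1, count = cycles[front]
--         except KeyError:
--             count = 0
--             front1 = front
--             while queue and (count + queue[0]) <= k:
--                 front1 = (front1 + 1) % n
--                 group = queue.pop(0)
--                 count += group
--                 riding.append(group)
--             queue.extend(riding)
--             del riding[:]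
--             cycles[front] = (front1, count)
--         result += count
--         front = front1
--     return result
-- ===== SOURCE B (Python) =====
-- def solve(r, k, n, g):
--     # Cycle detection: the per-ride front state eventually repeats, after which
--     # rides follow a fixed cycle; sum = prefix + full_cycles*cycle_sum + remainder.
--     if r <= 0:
--         return 0
--     index = {}            # front -> ride number at which it was first seen
--     prefix = [0]          # prefix[t] = people carried after t rides
--     front = 0
--     queue = list(g)
--     t = 0
--     while t < r and front not in index:
--         index[front] = t
--         count = 0
--         b = 0
--         while b < len(queue) and count + queue[b] <= k:
--             count += queue[b]
--             b += 1
--         front = (front + b) % n if b else front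
--         queue = queue[b:] + queue[:b]
--         prefix.append(prefix[-1] + count)
--         t += 1
--     if t >= r:
--         return prefix[-1]
--     j = index[front]
--     L = t - j
--     S = prefix[t] - prefix[j]
--     full, rem = divmod(r - t, L)
--     return prefix[t] + full * S + (prefix[j + rem] - prefix[j])
-- ===== Notes on version B (the rewrite author's own statement) =====
-- stated objective: faster
-- what changed: A simulates every one of the r rides (its memo only skips the boarding scan); B simulates rides only until the front state repeats, then computes the total in closed form as prefix sum + full-cycle count * cycle sum + remainder prefix, so the O(r) outer loop disappears.
import Mathlib
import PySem

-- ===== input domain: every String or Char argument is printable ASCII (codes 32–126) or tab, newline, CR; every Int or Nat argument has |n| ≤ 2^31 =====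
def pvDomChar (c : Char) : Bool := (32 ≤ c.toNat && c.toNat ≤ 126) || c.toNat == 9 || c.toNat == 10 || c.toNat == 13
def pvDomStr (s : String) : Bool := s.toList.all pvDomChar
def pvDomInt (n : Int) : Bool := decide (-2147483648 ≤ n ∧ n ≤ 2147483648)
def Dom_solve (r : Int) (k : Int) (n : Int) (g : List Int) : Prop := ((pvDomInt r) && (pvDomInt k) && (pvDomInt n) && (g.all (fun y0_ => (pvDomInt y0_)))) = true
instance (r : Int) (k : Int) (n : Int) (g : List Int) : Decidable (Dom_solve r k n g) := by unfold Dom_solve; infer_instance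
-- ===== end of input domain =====

-- B replaces A's O(r)-ride simulation by cycle detection on the front state:
-- it simulates only until a front repeats and then sums prefix + full-cycle-count * cycle-sum + remainder (objective: faster).

-- ===== PORT A =====
-- inner 'while queue and (count + queue[0]) <= k' loop: pops from queue, appends to riding
def boardA (k n : Int) : List Int → List Int → Int → Int → Int × Int × List Int × List Int
  | [], riding, front1, count => (front1, count, [], riding)
  | q :: rest, riding, front1, count =>
    if count + q ≤ k then
      boardA k n rest (riding ++ [q]) (PySem.Int.mod (front1 + 1) n) (count + q)
    else (front1, count, q :: rest, riding)

-- outer 'while r1 < r' loop; fuel = number of remaining rides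
def loopA (k n : Int) : Nat → Int → Int → List Int → PySem.Dict Int (Int × Int) → Int
  | 0, _, result, _, _ => result
  | fuel+1, front, result, queue, cycles =>
    match cycles.get? front with
    | some (front1, count) => loopA k n fuel front1 (result + count) queue cycles
    | none =>
      match boardA k n queue [] front 0 with
      | (front1, count, queue', riding) =>
        loopA k n fuel front1 (result + count) (queue' ++ riding)
          (cycles.insert front (front1, count))

def solve (r : Int) (k : Int) (n : Int) (g : List Int) : Int :=
  loopA k n r.toNat 0 0 g PySem.Dict.empty

-- ===== PORT B =====
-- inner boarding scan of Source B: returns (count, number of boarded groups)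
def boardB (k : Int) : List Int → Int → Nat → Int × Nat
  | [], count, b => (count, b)
  | q :: rest, count, b =>
    if count + q ≤ k then boardB k rest (count + q) (b + 1) else (count, b)

-- discovery loop of Source B; fuel = r - t; on a repeated front the closed formula is returned
def loopB (k n : Int) : Nat → Nat → Int → List Int → PySem.Dict Int Nat → List Int → Int
  | 0, _, _, _, _, pre => pre.getLast?.getD 0
  | fuel+1, t, front, queue, idx, pre =>
    match idx.get? front with
    | some j =>
      let L := t - j
      let m := fuel + 1
      pre.getD t 0 + ((m / L : Nat) : Int) * (pre.getD t 0 - pre.getD j 0)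
        + (pre.getD (j + m % L) 0 - pre.getD j 0)
    | none =>
      match boardB k queue 0 0 with
      | (count, b) =>
        loopB k n fuel (t+1)
          (if b = 0 then front else PySem.Int.mod (front + (b : Int)) n)
          (queue.drop b ++ queue.take b)
          (idx.insert front t)
          (pre ++ [pre.getLast?.getD 0 + count])

def solve_alt (r : Int) (k : Int) (n : Int) (g : List Int) : Int :=
  if r ≤ 0 then 0 else loopB k n r.toNat 0 0 g PySem.Dict.empty [0]

-- ===== PRECONDITION & SPEC =====
-- Pre_ excludes exactly the inputs where A raises ZeroDivisionError ('% n' with n = 0,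
-- reached iff at least one ride boards at least one group, i.e. r ≥ 1, g nonempty, g[0] ≤ k).
def Pre_solve (r : Int) (k : Int) (n : Int) (g : List Int) : Prop :=
  ¬ (1 ≤ r ∧ n = 0 ∧ g ≠ [] ∧ g.headD 0 ≤ k)
instance (r : Int) (k : Int) (n : Int) (g : List Int) : Decidable (Pre_solve r k n g) := by
  unfold Pre_solve; infer_instance

def pvWitness_solve : Int × Int × Int × List Int := (5, 6, 4, [1, 4, 2, 3])

def Spec_solve (r : Int) (k : Int) (n : Int) (g : List Int) (out : Int) : Prop := out = solve_alt r k n g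
instance (r : Int) (k : Int) (n : Int) (g : List Int) (out : Int) : Decidable (Spec_solve r k n g out) := by unfold Spec_solve; infer_instance

-- ===== CLAIM (what is proved, stated in full; the proofs are below) =====
def Claim_equal_solve : Prop := ∀ (r : Int) (k : Int) (n : Int) (g : List Int), Dom_solve r k n g → Pre_solve r k n g → Spec_solve r k n g (solve r k n g)

-- ===== LEMMAS AND PROOFS =====

-- partial sums: the value of Source B's 'prefix' list after the rides with counts 'cs'
def presums (cs : List Int) : List Int :=
  (List.range (cs.length + 1)).map (fun i => (cs.take i).sum)

-- the counts summed when walking the memo cycle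
def sumIdx (ds : List Int) (L : Nat) : Nat -> Nat -> Int
  | 0, _ => 0
  | m+1, i => ds.getD (i % L) 0 + sumIdx ds L m (i + 1)

theorem getD_drop (l : List Int) (m i : Nat) (d : Int) :
    (l.drop m).getD i d = l.getD (m + i) d := by
  simp [List.getD_eq_getElem?_getD, List.getElem?_drop]

theorem presums_snoc (cs : List Int) (c : Int) :
    presums (cs ++ [c]) = presums cs ++ [cs.sum + c] := by
  unfold presums
  simp only [List.length_append, List.length_singleton]
  rw [show cs.length + 1 + 1 = (cs.length + 1) + 1 from rfl, List.range_succ, List.map_append]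
  congr 1
  · apply List.map_congr_left
    intro i hi
    simp only [List.mem_range] at hi
    rw [List.take_append_of_le_length (by omega)]
  · simp

theorem presums_eq_snoc (cs : List Int) :
    presums cs = (List.range cs.length).map (fun i => (cs.take i).sum) ++ [cs.sum] := by
  unfold presums
  rw [List.range_succ, List.map_append]
  simp

theorem presums_getLast (cs : List Int) : (presums cs).getLast?.getD 0 = cs.sum := by
  rw [presums_eq_snoc]
  simp

theorem presums_getD (cs : List Int) (i : Nat) (h : i ≤ cs.length) :
    (presums cs).getD i 0 = (cs.take i).sum := by
  unfold presums
  exact PySem.List.getD_map_range (fun i => (cs.take i).sum) (cs.length+1) i 0 (by omega)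

theorem boardB_acc (k : Int) : ∀ (queue : List Int) (c : Int) (b : Nat),
    boardB k queue c b = ((boardB k queue c 0).1, (boardB k queue c 0).2 + b) := by
  intro queue
  induction queue with
  | nil => intro c b; simp [boardB]
  | cons q rest ih =>
    intro c b
    simp only [boardB]
    split
    · rw [ih (c+q) (b+1), ih (c+q) 1]; simp; omega
    · simp

theorem mod_mod_add (a b c : Int) : PySem.Int.mod (PySem.Int.mod a c + b) c = PySem.Int.mod (a + b) c := by
  simp [PySem.Int.mod]

theorem board_eq (k n : Int) : ∀ (queue riding : List Int) (front count : Int),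
    boardA k n queue riding front count =
      ((if (boardB k queue count 0).2 = 0 then front
        else PySem.Int.mod (front + ((boardB k queue count 0).2 : Int)) n),
       (boardB k queue count 0).1,
       queue.drop (boardB k queue count 0).2,
       riding ++ queue.take (boardB k queue count 0).2) := by
  intro queue
  induction queue with
  | nil => intro riding front count; simp [boardA, boardB]
  | cons q rest ih =>
    intro riding front count
    simp only [boardA, boardB]
    split
    · rw [ih, boardB_acc k rest (count+q) 1]
      simp only []
      set b' := (boardB k rest (count + q) 0).2 with hb'
      have h1 : b' + 1 ≠ 0 := by omega
      simp only [h1, if_false]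
      rcases Nat.eq_zero_or_pos b' with h | h
      · simp [h]
      · have h2 : b' ≠ 0 := by omega
        simp only [h2, if_false, mod_mod_add]
        rw [List.drop_succ_cons, List.take_succ_cons]
        refine congrArg₂ Prod.mk ?_ (congrArg₂ Prod.mk rfl (congrArg₂ Prod.mk rfl ?_))
        · congr 1; push_cast; ring
        · simp
    · simp

theorem walkA (k n : Int) (queue : List Int) (cycles : PySem.Dict Int (Int × Int))
    (cyc ds : List Int) (hL : 0 < cyc.length)
    (hcyc : ∀ i, i < cyc.length →
      cycles.get? (cyc.getD i 0) = some (cyc.getD ((i+1) % cyc.length) 0, ds.getD i 0)) :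
    ∀ (m i : Nat) (result : Int),
      loopA k n m (cyc.getD (i % cyc.length) 0) result queue cycles
        = result + sumIdx ds cyc.length m i := by
  intro m
  induction m with
  | zero => intro i result; simp [loopA, sumIdx]
  | succ m ih =>
    intro i result
    have hi : i % cyc.length < cyc.length := Nat.mod_lt _ hL
    simp only [loopA, hcyc _ hi, sumIdx]
    rw [Nat.mod_add_mod i cyc.length 1]
    rw [ih (i+1) (result + ds.getD (i % cyc.length) 0)]
    ring

theorem sumIdx_small (ds : List Int) (L : Nat) (hlen : ds.length = L) :
    ∀ (m i : Nat), i + m ≤ L → sumIdx ds L m i = ((ds.drop i).take m).sum := by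
  intro m
  induction m with
  | zero => intro i _; simp [sumIdx]
  | succ m ih =>
    intro i h
    have hi : i < L := by omega
    have : ds.drop i = ds[i] :: ds.drop (i+1) := List.drop_eq_getElem_cons (by omega)
    rw [sumIdx, Nat.mod_eq_of_lt hi, this, List.take_succ_cons, List.sum_cons,
      ih (i+1) (by omega), List.getD_eq_getElem ds 0 (by omega)]

theorem sumIdx_shift (ds : List Int) (L : Nat) :
    ∀ (m i : Nat), sumIdx ds L m (i + L) = sumIdx ds L m i := by
  intro m
  induction m with
  | zero => intro i; rfl
  | succ m ih =>
    intro i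
    rw [sumIdx, sumIdx, Nat.add_mod_right, show i + L + 1 = (i+1) + L by ring, ih]

theorem sumIdx_split (ds : List Int) (L : Nat) :
    ∀ (a b i : Nat), sumIdx ds L (a + b) i = sumIdx ds L a i + sumIdx ds L b (i + a) := by
  intro a
  induction a with
  | zero => intro b i; simp [sumIdx]
  | succ a ih =>
    intro b i
    rw [show a + 1 + b = (a + b) + 1 by ring, sumIdx, sumIdx, ih b (i+1)]
    rw [show i + 1 + a = i + (a+1) by ring]
    ring

theorem sumIdx_closed (ds : List Int) (L : Nat) (hlen : ds.length = L) (hL : 0 < L) :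
    ∀ m : Nat, sumIdx ds L m 0 = ((m / L : Nat) : Int) * ds.sum + (ds.take (m % L)).sum := by
  intro m
  induction m using Nat.strong_induction_on with
  | _ m ih =>
    by_cases h : m < L
    · rw [Nat.div_eq_of_lt h, Nat.mod_eq_of_lt h, sumIdx_small ds L hlen m 0 (by omega)]
      simp
    · have hm : m = L + (m - L) := by omega
      rw [hm, sumIdx_split ds L L (m - L) 0, sumIdx_small ds L hlen L 0 (by omega),
        show (0:Nat) + L = L by ring]
      have := sumIdx_shift ds L (m - L) 0
      rw [show (0:Nat) + L = L by ring] at this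
      rw [this, ih (m - L) (by omega)]
      rw [Nat.add_mod_left, Nat.add_div_left _ hL]
      simp only [List.drop_zero]
      rw [List.take_of_length_le (by omega)]
      push_cast
      ring

theorem main_loop (k n : Int) : ∀ (fuel : Nat) (fs cs : List Int) (front : Int)
    (queue : List Int) (cycles : PySem.Dict Int (Int × Int)) (idx : PySem.Dict Int Nat),
    cs.length = fs.length → fs.Nodup →
    (∀ (i : Nat) (h : i < fs.length),
        cycles.get? fs[i] = some ((fs ++ [front]).getD (i+1) 0, cs.getD i 0)) →
    (∀ f : Int, f ∉ fs → cycles.get? f = none) →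
    (∀ (i : Nat) (h : i < fs.length), idx.get? fs[i] = some i) →
    (∀ f : Int, f ∉ fs → idx.get? f = none) →
    loopA k n fuel front cs.sum queue cycles
      = loopB k n fuel fs.length front queue idx (presums cs) := by
  intro fuel
  induction fuel with
  | zero =>
    intro fs cs front queue cycles idx hlen hnd hC1 hC2 hI1 hI2
    simp [loopA, loopB, presums_getLast]
  | succ fuel ih =>
    intro fs cs front queue cycles idx hlen hnd hC1 hC2 hI1 hI2
    rcases hidx : idx.get? front with _ | j
    -- MISS: front unseen
    · have hmem : front ∉ fs := by
        intro hm
        obtain ⟨i, hi, hfi⟩ := List.mem_iff_getElem.mp hm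
        rw [← hfi, hI1 i hi] at hidx
        simp at hidx
      have hcy : cycles.get? front = none := hC2 front hmem
      rcases hbb : boardB k queue 0 0 with ⟨count, b⟩
      simp only [loopA, loopB, hidx, hcy, board_eq, hbb]
      rw [presums_getLast cs, show presums cs ++ [cs.sum + count] = presums (cs ++ [count])
            from (presums_snoc cs count).symm,
          show cs.sum + count = (cs ++ [count]).sum by simp]
      have key := ih (fs ++ [front]) (cs ++ [count])
        (if b = 0 then front else PySem.Int.mod (front + (b : Int)) n)
        (queue.drop b ++ queue.take b)
        (cycles.insert front ((if b = 0 then front else PySem.Int.mod (front + (b : Int)) n), count))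
        (idx.insert front fs.length)
        (by simp [hlen])
        (by
          rw [List.nodup_append]
          refine ⟨hnd, List.nodup_singleton _, ?_⟩
          exact fun a ha b hb h => hmem ((h.trans (List.mem_singleton.mp hb)) ▸ ha))
        ?_ ?_ ?_ ?_
      · simpa using key
      -- C1 for extended history
      · intro i hi
        rw [List.length_append, List.length_singleton] at hi
        by_cases hit : i < fs.length
        · rw [List.getElem_append_left hit, PySem.Dict.get?_insert,
            if_neg (fun (h : fs[i] = front) => hmem (h ▸ List.getElem_mem hit)), hC1 i hit]
          rw [List.getD_append (fs ++ [front]) [if b = 0 then front else PySem.Int.mod (front + (b : Int)) n] 0 (i+1) (by simp; omega),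
            List.getD_append cs [count] 0 i (by omega)]
        · have hieq : i = fs.length := by omega
          subst hieq
          rw [show (fs ++ [front])[fs.length] = front from by simp,
            PySem.Dict.get?_insert, if_pos rfl]
          rw [List.getD_append_right (fs ++ [front]) _ 0 (fs.length + 1) (by simp),
            List.getD_append_right cs [count] 0 fs.length (by omega)]
          simp [hlen]
      · intro f hf
        simp only [List.mem_append, List.mem_singleton, not_or] at hf
        rw [PySem.Dict.get?_insert, if_neg hf.2, hC2 f hf.1]
      · intro i hi
        rw [List.length_append, List.length_singleton] at hi
        by_cases hit : i < fs.length
        · rw [List.getElem_append_left hit, PySem.Dict.get?_insert,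
            if_neg (fun (h : fs[i] = front) => hmem (h ▸ List.getElem_mem hit)), hI1 i hit]
        · have hieq : i = fs.length := by omega
          subst hieq
          simp
      · intro f hf
        simp only [List.mem_append, List.mem_singleton, not_or] at hf
        rw [PySem.Dict.get?_insert, if_neg hf.2, hI2 f hf.1]
    -- HIT: front seen at index j
    · have hmem : front ∈ fs := by
        by_contra hm
        rw [hI2 front hm] at hidx
        simp at hidx
      obtain ⟨i, hi, hfi⟩ := List.mem_iff_getElem.mp hmem
      have hji : j = i := by
        have h2 := hI1 i hi
        rw [hfi, hidx] at h2
        exact (Option.some.injEq _ _).mp h2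
      subst hji
      have hjt : j < fs.length := hi
      set cyc := fs.drop j with hcyc_def
      set ds := cs.drop j with hds_def
      have hclen : cyc.length = fs.length - j := by simp [hcyc_def]
      have hdlen : ds.length = cyc.length := by simp [hds_def, hcyc_def, hlen]
      have hcpos : 0 < cyc.length := by omega
      have hcyc0 : cyc.getD 0 0 = front := by
        rw [hcyc_def, getD_drop fs j 0 0, Nat.add_zero,
          List.getD_eq_getElem fs 0 hjt, hfi]
      have hcycH : ∀ i', i' < cyc.length →
          cycles.get? (cyc.getD i' 0) = some (cyc.getD ((i'+1) % cyc.length) 0, ds.getD i' 0) := by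
        intro i' hi'
        have hjl : j + i' < fs.length := by omega
        have h1 : cyc.getD i' 0 = fs[j + i'] := by
          rw [hcyc_def, getD_drop fs j i' 0, List.getD_eq_getElem fs 0 hjl]
        rw [h1, hC1 (j + i') hjl]
        have h2 : cs.getD (j + i') 0 = ds.getD i' 0 := (getD_drop cs j i' 0).symm
        rw [h2]
        by_cases hend : i' + 1 = cyc.length
        · have hteq : j + i' + 1 = fs.length := by omega
          rw [hend, Nat.mod_self, hcyc0, hteq,
            List.getD_append_right fs [front] 0 fs.length (by omega)]
          simp
        · have hlt : j + i' + 1 < fs.length := by omega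
          rw [Nat.mod_eq_of_lt (by omega), List.getD_append fs [front] 0 (j+i'+1) hlt]
          rw [hcyc_def, getD_drop fs j (i'+1) 0, show j + (i'+1) = j + i' + 1 by ring]
      have hwalk := walkA k n queue cycles cyc ds hcpos hcycH (fuel+1) 0 cs.sum
      rw [Nat.zero_mod, hcyc0] at hwalk
      simp only [loopB, hidx]
      rw [hwalk, sumIdx_closed ds cyc.length hdlen hcpos (fuel+1), hclen]
      have hmodlt : (fuel+1) % (fs.length - j) < fs.length - j := Nat.mod_lt _ (by omega)
      have hdl : ds.length = fs.length - j := by omega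
      rw [presums_getD cs fs.length (by omega), presums_getD cs j (by omega),
        presums_getD cs (j + (fuel+1) % (fs.length - j)) (by omega)]
      rw [show cs.take fs.length = cs from List.take_of_length_le (by omega)]
      have hsplit : cs.take (j + (fuel+1) % (fs.length - j))
          = cs.take j ++ (cs.drop j).take ((fuel+1) % (fs.length - j)) := List.take_add
      rw [hsplit, List.sum_append, ← hds_def]
      have hsum : (cs.take j).sum + ds.sum = cs.sum := by
        rw [hds_def]; exact List.sum_take_add_sum_drop cs j
      have hds : ds.sum = cs.sum - (cs.take j).sum := by omega
      rw [hds]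
      ring_nf

-- ===== VERDICT (by name: the statement is the Claim_ definition above) =====
theorem solve_spec : Claim_equal_solve := by
  intro r k n g _ _
  unfold Spec_solve solve solve_alt
  by_cases hr : r <= 0
  · simp [hr, Int.toNat_of_nonpos hr, loopA]
  · simp only [hr, if_false]
    have := main_loop k n r.toNat [] [] 0 g PySem.Dict.empty PySem.Dict.empty
      rfl List.nodup_nil (by intro i h; simp at h) (by intro f _; simp)
      (by intro i h; simp at h) (by intro f _; simp)
    simpa [presums, List.range_succ] using this
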